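-- pv_equiv track=rewrite | github.com/eliottcassidy2000/math | 04-computation/n9_coefficient_matrix.py | get_ck
-- ===== SOURCE A (Python) =====
-- from math import comb, factorial
--
-- def eulerian_number(n, k):
--     if n == 0:
--         return 1 if k == 0 else 0
--     if k < 0 or k >= n:
--         return 0
--     return sum((-1)**j * comb(n+1, j) * (k+1-j)**n for j in range(k+2))
--
-- def get_ck(f, d):
--     """Inflated Eulerian coefficient c_k^{(f,d)} for k = 0, ..., d."""
--     result = []
--     for k in range(d + 1):
--         total = 0
--         for j in range(f + 1):
--             if k - j < 0 or k - j > d - f: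
--                 continue
--             sign = (-1) ** (d - f - k + j)
--             total += eulerian_number(f + 1, j) * comb(d - f, k - j) * sign
--         result.append(total)
--     return result
-- ===== SOURCE B (Python) =====
-- from math import comb
--
-- def get_ck(f, d):
--     """Inflated Eulerian coefficient c_k^{(f,d)} for k = 0, ..., d."""
--     if d < 0:
--         return []
--     m = d - f
--     if f < 0 or m < 0:
--         return [0] * (d + 1)
--     n = f + 1
--     # Eulerian numbers E(n, j) for j = 0..n-1, computed once
--     E = [sum((-1) ** i * comb(n + 1, i) * (j + 1 - i) ** n for i in range(j + 2))
--          for j in range(n)]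
--     # signed binomial row B[i] = (-1)^(m-i) * C(m, i)
--     B = [(-1) ** (m - i) * comb(m, i) for i in range(m + 1)]
--     # convolve
--     return [sum(E[j] * (B[k - j] if 0 <= k - j <= m else 0) for j in range(n))
--             for k in range(d + 1)]
-- ===== Notes on version B (the rewrite author's own statement) =====
-- stated objective: faster
-- what changed: B computes the Eulerian-number row for f+1 once and the signed binomial row once, then produces each c_k by convolving the two tables, instead of A's re-evaluating the O(f)-term Eulerian sum inside every (k, j) iteration.
import Mathlib
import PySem

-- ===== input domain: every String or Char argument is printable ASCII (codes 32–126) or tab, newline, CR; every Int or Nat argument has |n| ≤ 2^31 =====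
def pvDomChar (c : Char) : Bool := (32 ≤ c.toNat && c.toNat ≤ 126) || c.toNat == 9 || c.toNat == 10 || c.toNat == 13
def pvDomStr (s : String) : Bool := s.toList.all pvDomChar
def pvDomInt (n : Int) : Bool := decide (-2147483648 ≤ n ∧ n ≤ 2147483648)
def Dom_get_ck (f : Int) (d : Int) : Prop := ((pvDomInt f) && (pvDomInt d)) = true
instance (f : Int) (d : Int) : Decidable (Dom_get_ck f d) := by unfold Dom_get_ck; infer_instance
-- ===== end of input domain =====

-- B hoists the Eulerian row E(f+1, ·) out of the k-loop (computed once) and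
-- precomputes the signed binomial row, then convolves: O(d·f + f²) work vs A's O(d·f²).

-- ===== PORT A =====

-- math.comb on the nonnegative arguments A ever passes it (exact there)
def pycomb (n k : Int) : Int := (Nat.choose n.toNat k.toNat : Int)

def eulerian_number (n k : Int) : Int :=
  if n = 0 then (if k = 0 then 1 else 0)
  else if k < 0 ∨ k ≥ n then 0
  else ((PySem.List.pyRange 0 (k + 2) 1).map (fun j =>
          (-1) ^ j.toNat * pycomb (n + 1) j * (k + 1 - j) ^ n.toNat)).sum

def get_ck (f : Int) (d : Int) : List Int :=
  (PySem.List.pyRange 0 (d + 1) 1).map (fun k =>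
    (PySem.List.pyRange 0 (f + 1) 1).foldl (fun total j =>
      if k - j < 0 ∨ k - j > d - f then total
      else total + eulerian_number (f + 1) j * pycomb (d - f) (k - j)
                     * (-1) ^ (d - f - k + j).toNat) 0)

-- ===== PORT B =====
def get_ck_alt (f : Int) (d : Int) : List Int :=
  if d < 0 then []
  else
    let m := d - f
    if f < 0 ∨ m < 0 then List.replicate (d + 1).toNat 0
    else
      let n := f + 1
      let E := (PySem.List.pyRange 0 n 1).map (fun j =>
        ((PySem.List.pyRange 0 (j + 2) 1).map (fun i =>
          (-1) ^ i.toNat * pycomb (n + 1) i * (j + 1 - i) ^ n.toNat)).sum)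
      let B := (PySem.List.pyRange 0 (m + 1) 1).map (fun i =>
        (-1) ^ (m - i).toNat * pycomb m i)
      (PySem.List.pyRange 0 (d + 1) 1).map (fun k =>
        ((PySem.List.pyRange 0 n 1).map (fun j =>
          PySem.List.pyGetD E j 0 *
            (if 0 ≤ k - j ∧ k - j ≤ m then PySem.List.pyGetD B (k - j) 0 else 0))).sum)

-- ===== PRECONDITION & SPEC =====
def Spec_get_ck (f : Int) (d : Int) (out : List Int) : Prop := out = get_ck_alt f d
instance (f : Int) (d : Int) (out : List Int) : Decidable (Spec_get_ck f d out) := by unfold Spec_get_ck; infer_instance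

-- ===== CLAIM (what is proved, stated in full; the proofs are below) =====
def Claim_equal_get_ck : Prop := ∀ (f : Int) (d : Int), Dom_get_ck f d → Spec_get_ck f d (get_ck f d)

-- ===== LEMMAS AND PROOFS =====

-- a 'continue'-style fold is the sum of the non-skipped terms
theorem foldl_skip_add (l : List Int) (p : Int → Prop) [DecidablePred p] (g : Int → Int) (a : Int) :
    l.foldl (fun acc x => if p x then acc else acc + g x) a
      = a + (l.map (fun x => if p x then 0 else g x)).sum := by
  have h := PySem.List.foldl_congr_mem (l := l) (init := a)
    (f := fun acc x => if p x then acc else acc + g x)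
    (g := fun acc x => acc + (if p x then 0 else g x))
    (by intro acc x _; by_cases h : p x <;> simp [h])
  rw [h, PySem.List.foldl_add]

-- ===== VERDICT (by name: the statement is the Claim_ definition above) =====
theorem get_ck_spec : Claim_equal_get_ck := by
  intro f d _
  unfold Spec_get_ck get_ck get_ck_alt
  by_cases hd : d < 0
  · rw [if_pos hd, PySem.List.pyRange_one_eq_nil (a := 0) (b := d + 1) (by omega), List.map_nil]
  rw [if_neg hd]
  by_cases hz : f < 0 ∨ d - f < 0
  · rw [if_pos hz]
    have hzero : ∀ k : Int,
        (PySem.List.pyRange 0 (f + 1) 1).foldl (fun total j =>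
          if k - j < 0 ∨ k - j > d - f then total
          else total + eulerian_number (f + 1) j * pycomb (d - f) (k - j)
                         * (-1) ^ (d - f - k + j).toNat) 0 = 0 := by
      intro k
      rcases hz with hf | hm
      · rw [PySem.List.pyRange_one_eq_nil (by omega)]; rfl
      · rw [foldl_skip_add, zero_add,
            List.map_congr_left (fun j _ => if_pos (by omega))]
        simp
    calc (PySem.List.pyRange 0 (d + 1) 1).map _
        = (PySem.List.pyRange 0 (d + 1) 1).map (fun _ => (0 : Int)) :=
          List.map_congr_left (fun k _ => hzero k)
      _ = List.replicate (d + 1).toNat 0 := by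
          rw [List.map_const', PySem.List.length_pyRange_one]; norm_num
  rw [if_neg hz]
  apply List.map_congr_left
  intro k hk
  rw [foldl_skip_add, zero_add]
  congr 1
  apply List.map_congr_left
  intro j hj
  rw [PySem.List.mem_pyRange_one] at hj
  rw [PySem.List.pyGetD_map_pyRange_of_nonneg _ _ _ _ hj.1 hj.2]
  by_cases hc : k - j < 0 ∨ k - j > d - f
  · have hc' : ¬ (0 ≤ k - j ∧ k - j ≤ d - f) := by omega
    rw [if_pos hc, if_neg hc', mul_zero]
  · have hc' : 0 ≤ k - j ∧ k - j ≤ d - f := by omega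
    rw [if_neg hc, if_pos hc']
    rw [PySem.List.pyGetD_map_pyRange_of_nonneg _ _ _ _ hc'.1 (by omega)]
    have hE : eulerian_number (f + 1) j =
        ((PySem.List.pyRange 0 (j + 2) 1).map (fun i =>
          (-1) ^ i.toNat * pycomb (f + 1 + 1) i * (j + 1 - i) ^ (f + 1).toNat)).sum := by
      unfold eulerian_number
      rw [if_neg (by omega), if_neg (by omega)]
    rw [hE]
    have hexp : d - f - k + j = d - f - (k - j) := by ring
    rw [hexp]
    ring
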